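-- pv_equiv track=rewrite | github.com/MaxEntGirl/Prag | src/hw09_wordnet/lesk_sim.py | get_overlap
-- ===== SOURCE A (Python) =====
-- def get_overlap(definition_words1, definition_words2):
--     # find overlap in definitions, consider words occuring twice
--
--     if len(definition_words2) > len(definition_words1):
--         count_overlap = 0
--         for token in definition_words1:
--             if token in definition_words2:
--                 count_overlap += 1
--
--         return count_overlap
--     else:
--         count_overlap = 0
--         for token in definition_words2:
--             if token in definition_words1:
--                 count_overlap += 1
--
--         return count_overlap
-- ===== SOURCE B (Python) =====
-- def get_overlap(definition_words1, definition_words2):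
--     # find overlap in definitions, consider words occuring twice
--     if len(definition_words2) > len(definition_words1):
--         small, big = definition_words1, definition_words2
--     else:
--         small, big = definition_words2, definition_words1
--     s = sorted(small)                # shorter list, sorted, duplicates kept
--     b = sorted(set(big))             # longer list, deduplicated and sorted
--     i = j = count = 0
--     while i < len(s) and j < len(b):
--         if s[i] < b[j]:
--             i += 1
--         elif b[j] < s[i]:
--             j += 1
--         else:
--             count += 1
--             i += 1
--     return count
-- ===== Notes on version B (the rewrite author's own statement) =====
-- stated objective: faster
-- what changed: Replaces A's per-token linear scan of the longer list by sorting the shorter list and the deduplicated longer list and counting matches with a single two-pointer merge pass.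
import Mathlib
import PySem

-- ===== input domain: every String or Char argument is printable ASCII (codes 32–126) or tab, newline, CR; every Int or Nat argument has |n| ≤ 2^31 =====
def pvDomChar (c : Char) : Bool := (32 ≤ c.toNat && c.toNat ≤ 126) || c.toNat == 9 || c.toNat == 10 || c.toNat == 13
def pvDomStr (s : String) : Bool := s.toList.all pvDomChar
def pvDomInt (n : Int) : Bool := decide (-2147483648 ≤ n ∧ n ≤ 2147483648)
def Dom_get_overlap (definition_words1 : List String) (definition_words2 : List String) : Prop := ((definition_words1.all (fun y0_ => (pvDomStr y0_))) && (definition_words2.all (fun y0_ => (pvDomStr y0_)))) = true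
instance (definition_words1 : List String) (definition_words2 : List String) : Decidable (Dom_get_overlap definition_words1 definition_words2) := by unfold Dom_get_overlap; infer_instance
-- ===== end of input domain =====

-- B sorts the shorter list and the deduplicated longer list and counts overlaps
-- with a two-pointer merge pass instead of A's per-token scans (objective: faster).


-- ===== PORT A =====
def get_overlap (definition_words1 : List String) (definition_words2 : List String) : Int :=
  if definition_words2.length > definition_words1.length then
    definition_words1.foldl
      (fun count_overlap token =>
        if token ∈ definition_words2 then count_overlap + 1 else count_overlap) 0
  else
    definition_words2.foldl
      (fun count_overlap token =>
        if token ∈ definition_words1 then count_overlap + 1 else count_overlap) 0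

-- ===== PORT B =====
-- the two-pointer while loop of Source B, as structural recursion consuming the
-- element each pointer advance passes over
def mergeCountOverlap : List String → List String → Int
  | [], _ => 0
  | _ :: _, [] => 0
  | x :: xs, y :: ys =>
    if x < y then mergeCountOverlap xs (y :: ys)
    else if y < x then mergeCountOverlap (x :: xs) ys
    else 1 + mergeCountOverlap xs (y :: ys)
termination_by a b => a.length + b.length
decreasing_by all_goals simp

def get_overlap_alt (definition_words1 : List String) (definition_words2 : List String) : Int :=
  let sb : List String × List String :=
    if definition_words2.length > definition_words1.length then
      (definition_words1, definition_words2)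
    else
      (definition_words2, definition_words1)
  let s : List String := PySem.List.sorted sb.1 (fun x => x) false
  let b : List String := PySem.List.sorted (PySem.Set.ofList sb.2) (fun x => x) false
  mergeCountOverlap s b

-- ===== PRECONDITION & SPEC =====
def Spec_get_overlap (definition_words1 : List String) (definition_words2 : List String) (out : Int) : Prop := out = get_overlap_alt definition_words1 definition_words2
instance (definition_words1 : List String) (definition_words2 : List String) (out : Int) : Decidable (Spec_get_overlap definition_words1 definition_words2 out) := by unfold Spec_get_overlap; infer_instance

-- ===== CLAIM =====
def Claim_equal_get_overlap : Prop := ∀ (definition_words1 : List String) (definition_words2 : List String), Dom_get_overlap definition_words1 definition_words2 → Spec_get_overlap definition_words1 definition_words2 (get_overlap definition_words1 definition_words2)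

-- ===== LEMMAS AND PROOFS =====

-- merge over a sorted list s and a strictly-sorted list b counts the elements
-- of s that occur in b
theorem pv_mergeCount_eq (s b : List String)
    (hs : s.Pairwise (· ≤ ·)) (hb : b.Pairwise (· < ·)) :
    mergeCountOverlap s b = (s.countP (fun t => t ∈ b) : Int) := by
  induction s, b using mergeCountOverlap.induct with
  | case1 b => simp [mergeCountOverlap]
  | case2 x xs => simp [mergeCountOverlap]
  | case3 x xs y ys hlt ih =>
    -- x < y: x is in neither y nor ys, so it contributes nothing
    have hx : x ∉ y :: ys := by
      intro hmem
      rcases List.mem_cons.mp hmem with h | h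
      · exact absurd (h ▸ hlt) (lt_irrefl y)
      · exact absurd (lt_trans hlt ((List.pairwise_cons.mp hb).1 x h)) (lt_irrefl x)
    rw [mergeCountOverlap, if_pos hlt, ih (List.pairwise_cons.mp hs).2 hb]
    simp only [List.mem_cons, not_or] at hx
    simp [hx.1, hx.2]
  | case4 x xs y ys hnlt hlt ih =>
    -- y < x: y is in neither x nor xs, so dropping y changes no membership test
    have hy : ∀ z ∈ x :: xs, z ≠ y := by
      intro z hz
      rcases List.mem_cons.mp hz with h | h
      · intro he
        subst h; subst he
        exact lt_irrefl z hlt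
      · intro he
        have hyz : y < z := lt_of_lt_of_le hlt ((List.pairwise_cons.mp hs).1 z h)
        rw [he] at hyz
        exact lt_irrefl y hyz
    rw [mergeCountOverlap, if_neg hnlt, if_pos hlt,
        ih hs (List.pairwise_cons.mp hb).2]
    congr 1
    apply List.countP_congr
    intro z hz
    have hzy : z ≠ y := hy z hz
    simp [List.mem_cons, hzy]
  | case5 x xs y ys hnlt hnlt' ih =>
    -- x = y: count it and advance the pointer into s
    have hxy : x = y := le_antisymm (not_lt.mp hnlt') (not_lt.mp hnlt)
    have hx : x ∈ y :: ys := List.mem_cons.mpr (Or.inl hxy)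
    rw [mergeCountOverlap, if_neg hnlt, if_neg hnlt',
        ih (List.pairwise_cons.mp hs).2 hb]
    simp [hxy]
    ring

-- B's merge pass over the two sorted lists equals A's counting loop,
-- for any choice of small/big
theorem pv_core (small big : List String) :
    mergeCountOverlap (PySem.List.sorted small (fun x => x) false)
        (PySem.List.sorted (PySem.Set.ofList big) (fun x => x) false)
      = small.foldl (fun acc tok => if tok ∈ big then acc + 1 else acc) 0 := by
  rw [PySem.List.foldl_ite_add_one]
  rw [pv_mergeCount_eq _ _
        (by simpa using PySem.List.sorted_pairwise small (fun x => x))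
        (PySem.List.sorted_ofList_pairwise_lt big)]
  have h1 : (PySem.List.sorted small (fun x => x) false).countP
        (fun t => t ∈ PySem.List.sorted (PySem.Set.ofList big) (fun x => x) false)
      = (PySem.List.sorted small (fun x => x) false).countP (fun t => t ∈ big) := by
    apply List.countP_congr
    intro z _
    simp [PySem.List.mem_sorted, PySem.Set.mem_ofList]
  rw [h1, (PySem.List.sorted_perm small (fun x => x) false).countP_eq]
  simp

-- ===== VERDICT =====
theorem get_overlap_spec : Claim_equal_get_overlap := by
  intro w1 w2 _
  show get_overlap w1 w2 = get_overlap_alt w1 w2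
  unfold get_overlap get_overlap_alt
  by_cases h : w2.length > w1.length <;>
    simp only [h, if_true, if_false] <;> exact (pv_core _ _).symm
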